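-- pv_equiv track=rewrite | github.com/marcoachury/pymesh | Distancias.py | busca_duplicados
-- ===== SOURCE A (Python) =====
-- def busca_duplicados(malla):
--     duplicados = []
--     num_nodos = len(malla)
--     for i in range (num_nodos):
--         i0 = malla[i][0]
--         i1 = malla[i][1]
--         a = [i0,i1]
--         b = [i1,i0]
--         for j in range(i+1, num_nodos, 1):
--             '''print (i,j)
--             print (malla[j])
--             print (malla[j][0:2])'''
--             if ((malla[j][0:2] == a) or (malla[j][0:2] == b)):
--                 duplicados.append([i,j])
--     return duplicados
-- ===== SOURCE B (Python) =====
-- def busca_duplicados(malla):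
--     grupos = {}
--     claves = []
--     for idx, fila in enumerate(malla):
--         k = (fila[0], fila[1]) if fila[0] <= fila[1] else (fila[1], fila[0])
--         claves.append(k)
--         grupos.setdefault(k, []).append(idx)
--     out = []
--     for i, k in enumerate(claves):
--         for j in grupos[k]:
--             if j > i:
--                 out.append([i, j])
--     return out
-- ===== Notes on version B (the rewrite author's own statement) =====
-- stated objective: faster
-- what changed: Replaces A's O(n^2) all-pairs comparison of sliced edge rows by a dict pass that groups row indices under a normalised (sorted first-two-element) key, then emits each row's later group-mates directly, producing the (i, j)-ordered output without any pairwise slice comparisons.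
import Mathlib
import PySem

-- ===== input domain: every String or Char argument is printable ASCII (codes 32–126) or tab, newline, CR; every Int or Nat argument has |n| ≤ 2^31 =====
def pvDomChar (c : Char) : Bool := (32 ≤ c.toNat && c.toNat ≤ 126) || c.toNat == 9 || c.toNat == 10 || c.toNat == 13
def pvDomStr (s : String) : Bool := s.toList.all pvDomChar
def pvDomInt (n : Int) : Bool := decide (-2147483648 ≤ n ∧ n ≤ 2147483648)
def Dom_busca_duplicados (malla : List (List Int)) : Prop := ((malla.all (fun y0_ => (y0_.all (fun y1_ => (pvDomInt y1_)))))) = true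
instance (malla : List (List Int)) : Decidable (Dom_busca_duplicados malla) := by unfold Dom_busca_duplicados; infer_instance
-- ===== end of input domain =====

-- B replaces A's all-pairs comparison of sliced edge rows by a dict pass grouping row indices
-- under a normalised (sorted first-two-element) key, then emits each row's later group-mates
-- directly in (i, j) order (objective: faster, measured).

-- ===== PORT A =====
def busca_duplicados (malla : List (List Int)) : List (List Int) :=
  let num_nodos : Int := malla.length
  (PySem.List.pyRange 0 num_nodos 1).foldl (fun duplicados i =>
    let fila := PySem.List.pyGetD malla i []
    let i0 := PySem.List.pyGetD fila 0 0
    let i1 := PySem.List.pyGetD fila 1 0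
    let a := [i0, i1]
    let b := [i1, i0]
    (PySem.List.pyRange (i + 1) num_nodos 1).foldl (fun duplicados j =>
      let filaj := PySem.List.pyGetD malla j []
      if PySem.List.slice filaj (some 0) (some 2) = a ∨ PySem.List.slice filaj (some 0) (some 2) = b
      then duplicados ++ [[i, j]]
      else duplicados) duplicados) []

-- ===== PORT B =====
-- key of a row: its first two entries as a sorted pair (Source B's inline conditional expression)
def pvKey (fila : List Int) : Int × Int :=
  if PySem.List.pyGetD fila 0 0 ≤ PySem.List.pyGetD fila 1 0
  then (PySem.List.pyGetD fila 0 0, PySem.List.pyGetD fila 1 0)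
  else (PySem.List.pyGetD fila 1 0, PySem.List.pyGetD fila 0 0)

def busca_duplicados_alt (malla : List (List Int)) : List (List Int) :=
  -- one pass: st.1 = grupos (grupos.setdefault(k, []).append(idx) = modify k [] (· ++ [idx])),
  -- st.2 = claves
  let st := (PySem.List.enumerate malla).foldl
    (fun st p => (st.1.modify (pvKey p.2) [] (fun g => g ++ [p.1]), st.2 ++ [pvKey p.2]))
    (PySem.Dict.empty, [])
  -- grupos[k]: k is always a present key here, so Python's d[k] is exactly getD
  (PySem.List.enumerate st.2).foldl (fun out q =>
    (st.1.getD q.2 []).foldl (fun out j => if j > q.1 then out ++ [[q.1, j]] else out) out) []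

-- ===== PRECONDITION & SPEC =====
-- Pre_ excludes exactly the inputs where A raises: a row with fewer than two entries
-- makes malla[i][1] (and B's fila[1]) raise IndexError.
def Pre_busca_duplicados (malla : List (List Int)) : Prop := ∀ fila ∈ malla, 2 ≤ fila.length
instance (malla : List (List Int)) : Decidable (Pre_busca_duplicados malla) := by unfold Pre_busca_duplicados; infer_instance

def pvWitness_busca_duplicados : List (List Int) := [[1, 2], [2, 1], [0, 0]]

def Spec_busca_duplicados (malla : List (List Int)) (out : List (List Int)) : Prop := out = busca_duplicados_alt malla
instance (malla : List (List Int)) (out : List (List Int)) : Decidable (Spec_busca_duplicados malla out) := by unfold Spec_busca_duplicados; infer_instance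

-- ===== CLAIM (what is proved, stated in full; the proofs are below) =====
def Claim_equal_busca_duplicados : Prop := ∀ (malla : List (List Int)), Dom_busca_duplicados malla → Pre_busca_duplicados malla → Spec_busca_duplicados malla (busca_duplicados malla)

-- ===== LEMMAS AND PROOFS =====

-- the canonical description both programs are reduced to
def pvKeyAt (malla : List (List Int)) (i : Int) : Int × Int := pvKey (PySem.List.pyGetD malla i [])

def pvCanon (malla : List (List Int)) : List (List Int) :=
  (PySem.List.pyRange 0 malla.length 1).flatMap (fun i =>
    ((PySem.List.pyRange (i + 1) malla.length 1).filter
      (fun j => pvKeyAt malla j == pvKeyAt malla i)).map (fun j => [i, j]))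

theorem pv_take2 (fila : List Int) (h : 2 ≤ fila.length) :
    PySem.List.slice fila (some 0) (some 2) = [PySem.List.pyGetD fila 0 0, PySem.List.pyGetD fila 1 0] := by
  match fila, h with
  | a :: b :: t, _ =>
    rw [PySem.List.pyGetD_zero_cons, PySem.List.pyGetD_ofNat' (a :: b :: t) 1 0]
    simp [PySem.List.slice, PySem.List.clampIdx]

theorem pv_cond_iff (fi fj : List Int) (hj : 2 ≤ fj.length) :
    (PySem.List.slice fj (some 0) (some 2) = [PySem.List.pyGetD fi 0 0, PySem.List.pyGetD fi 1 0] ∨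
     PySem.List.slice fj (some 0) (some 2) = [PySem.List.pyGetD fi 1 0, PySem.List.pyGetD fi 0 0]) ↔
    pvKey fj = pvKey fi := by
  rw [pv_take2 fj hj]
  unfold pvKey
  split_ifs <;> simp_all [Prod.ext_iff] <;> omega

theorem pv_row_len (malla : List (List Int)) (h : Pre_busca_duplicados malla)
    (i : Int) (h0 : 0 ≤ i) (h1 : i < (malla.length : Int)) :
    2 ≤ (PySem.List.pyGetD malla i []).length := by
  apply h
  exact PySem.List.pyGetD_mem malla [] ⟨by omega, by omega⟩

theorem pv_A_eq_canon (malla : List (List Int)) (h : Pre_busca_duplicados malla) :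
    busca_duplicados malla = pvCanon malla := by
  unfold busca_duplicados pvCanon
  rw [PySem.List.foldl_congr_mem _ _
    (fun dup i => dup ++ ((PySem.List.pyRange (i + 1) (malla.length : Int) 1).filter
      (fun j => pvKeyAt malla j == pvKeyAt malla i)).map (fun j => [i, j])) _ ?_]
  · rw [PySem.List.foldl_append_eq_flatMap]; simp
  · intro dup i hi
    rw [PySem.List.mem_pyRange_one] at hi
    rw [PySem.List.foldl_congr_mem _ _
      (fun dup j => if (pvKeyAt malla j == pvKeyAt malla i) = true then dup ++ [[i, j]] else dup) _ ?_]
    · exact PySem.List.foldl_append_if _ _ _ _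
    · intro dup2 j hjm
      rw [PySem.List.mem_pyRange_one] at hjm
      have hlen : 2 ≤ (PySem.List.pyGetD malla j []).length :=
        pv_row_len malla h j (by omega) (by omega)
      have hiff := pv_cond_iff (PySem.List.pyGetD malla i []) (PySem.List.pyGetD malla j []) hlen
      simp only [beq_iff_eq, pvKeyAt]
      rw [if_congr hiff rfl rfl]



def pvGroup (malla : List (List Int)) (k : Int × Int) : List Int :=
  ((PySem.List.enumerate malla).filter (fun p => pvKey p.2 == k)).map (fun p => p.1)

theorem pv_group_pairwise (malla : List (List Int)) (k : Int × Int) :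
    (pvGroup malla k).Pairwise (· < ·) := by
  unfold pvGroup
  apply List.Pairwise.map
  · exact fun p q h => h
  · exact List.Pairwise.sublist List.filter_sublist (PySem.List.pairwise_lt_enumerate malla 0)

theorem pv_mem_group (malla : List (List Int)) (k : Int × Int) (i : Int) :
    i ∈ pvGroup malla k ↔ ∃ m : Nat, ∃ _ : m < malla.length, i = (m : Int) ∧ pvKey malla[m] = k := by
  unfold pvGroup
  simp only [List.mem_map, List.mem_filter, PySem.List.mem_enumerate_iff, beq_iff_eq]
  constructor
  · rintro ⟨p, ⟨⟨m, hm, rfl⟩, hk⟩, rfl⟩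
    exact ⟨m, hm, by simp, hk⟩
  · rintro ⟨m, hm, rfl, hk⟩
    exact ⟨((m : Int), malla[m]), ⟨⟨m, hm, by simp⟩, hk⟩, rfl⟩

theorem pv_keyAt_nat (malla : List (List Int)) (m : Nat) (hm : m < malla.length) :
    pvKeyAt malla (m : Int) = pvKey malla[m] := by
  unfold pvKeyAt
  rw [PySem.List.pyGetD_natCast, List.getD_eq_getElem _ _ hm]

theorem pv_dict_getD (malla : List (List Int)) (k : Int × Int) :
    ((PySem.List.enumerate malla).foldl
      (fun d p => d.modify (pvKey p.2) [] (fun g => g ++ [p.1])) PySem.Dict.empty).getD k []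
      = pvGroup malla k := by
  have hfold : (PySem.List.enumerate malla).foldl
      (fun d p => d.modify (pvKey p.2) [] (fun g => g ++ [p.1])) PySem.Dict.empty
      = ((PySem.List.enumerate malla).map (fun p => (pvKey p.2, p.1))).foldl
      (fun d q => d.modify q.1 [] (fun g => g ++ [q.2])) PySem.Dict.empty := by
    rw [List.foldl_map]
  rw [hfold, PySem.Dict.getD_foldl_modify_append]
  simp [PySem.Dict.getD_empty, pvGroup, List.filter_map, List.map_map, Function.comp_def]

theorem pv_inner (g : List Int) (i : Int) (out : List (List Int)) :
    g.foldl (fun out j => if j > i then out ++ [[i, j]] else out) out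
      = out ++ (g.filter (fun j => decide (i < j))).map (fun j => [i, j]) := by
  have h := PySem.List.foldl_append_if (fun j => decide (i < j)) (fun j => [i, j]) g out
  simpa [gt_iff_lt] using h

theorem pv_claves_get (malla : List (List Int)) (i : Int) (h0 : 0 ≤ i) (_hn : i < (malla.length : Int)) :
    PySem.List.pyGetD ((PySem.List.enumerate malla).map (fun p => pvKey p.2)) i (0, 0)
      = pvKeyAt malla i := by
  have hm : i.toNat < ((PySem.List.enumerate malla).map (fun p => pvKey p.2)).length := by
    simp only [List.length_map, PySem.List.length_enumerate]; omega
  rw [PySem.List.pyGetD_eq_getElem _ (0, 0) h0 (by simp only [List.length_map, PySem.List.length_enumerate]; omega)]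
  have hi : i = ((i.toNat : Nat) : Int) := by omega
  rw [List.getElem_map, PySem.List.getElem_enumerate]
  conv_rhs => rw [hi]
  rw [pv_keyAt_nat malla i.toNat (by simpa [PySem.List.length_enumerate] using hm)]

theorem pv_B_eq (malla : List (List Int)) :
    busca_duplicados_alt malla =
      (PySem.List.pyRange 0 malla.length 1).flatMap (fun i =>
        ((pvGroup malla (PySem.List.pyGetD ((PySem.List.enumerate malla).map (fun p => pvKey p.2)) i (0, 0))).filter
          (fun j => decide (i < j))).map (fun j => [i, j])) := by
  simp only [busca_duplicados_alt]
  have hsplit := PySem.List.foldl_prod_mk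
    (fun (d : PySem.Dict (Int × Int) (List Int)) (p : Int × List Int) =>
      d.modify (pvKey p.2) [] (fun g => g ++ [p.1]))
    (fun (c : List (Int × Int)) (p : Int × List Int) => c ++ [pvKey p.2])
    (PySem.List.enumerate malla) PySem.Dict.empty []
  rw [hsplit]
  rw [PySem.List.foldl_append_singleton_eq_map (fun p => pvKey p.2) (PySem.List.enumerate malla) []]
  simp only [List.nil_append]
  rw [PySem.List.enumerate_eq_map_pyRange ((PySem.List.enumerate malla).map (fun p => pvKey p.2)) (0, 0)]
  rw [List.foldl_map]
  rw [PySem.List.foldl_congr_mem _ _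
    (fun out j => out ++ ((pvGroup malla (PySem.List.pyGetD
        ((PySem.List.enumerate malla).map (fun p => pvKey p.2)) j (0, 0))).filter
      (fun j' => decide (j < j'))).map (fun j' => [j, j'])) _ ?_]
  · rw [PySem.List.foldl_append_eq_flatMap]
    simp [PySem.List.len_eq, PySem.List.length_enumerate]
  · intro out j _
    rw [pv_dict_getD, pv_inner]

theorem pv_inner_eq (malla : List (List Int)) (i : Int) (_h0 : 0 ≤ i) (_hn : i < (malla.length : Int)) :
    (pvGroup malla (pvKeyAt malla i)).filter (fun j => decide (i < j))
      = (PySem.List.pyRange (i + 1) malla.length 1).filter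
          (fun j => pvKeyAt malla j == pvKeyAt malla i) := by
  apply List.Perm.eq_of_pairwise (le := (· < ·)) (fun a b _ _ hab hba => by omega)
  · exact List.Pairwise.sublist List.filter_sublist (pv_group_pairwise malla _)
  · exact List.Pairwise.sublist List.filter_sublist (PySem.List.pairwise_lt_pyRange_one _ _)
  · apply (List.perm_ext_iff_of_nodup
      ((List.Pairwise.sublist List.filter_sublist (pv_group_pairwise malla _)).imp ne_of_lt)
      ((List.Pairwise.sublist List.filter_sublist (PySem.List.pairwise_lt_pyRange_one _ _)).imp ne_of_lt)).mpr
    intro x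
    simp only [List.mem_filter, PySem.List.mem_pyRange_one, pv_mem_group, decide_eq_true_eq, beq_iff_eq]
    constructor
    · rintro ⟨⟨m, hm, rfl, hk⟩, hlt⟩
      refine ⟨⟨by omega, by exact_mod_cast hm⟩, ?_⟩
      rw [pv_keyAt_nat malla m hm, hk]
    · rintro ⟨⟨hge, hltn⟩, hk⟩
      have hm : x.toNat < malla.length := by omega
      have hx : x = ((x.toNat : Nat) : Int) := by omega
      refine ⟨⟨x.toNat, hm, hx, ?_⟩, by omega⟩
      rw [← pv_keyAt_nat malla x.toNat hm, ← hx, hk]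

theorem pv_main (malla : List (List Int)) (h : Pre_busca_duplicados malla) :
    busca_duplicados malla = busca_duplicados_alt malla := by
  rw [pv_B_eq, pv_A_eq_canon malla h]
  unfold pvCanon
  rw [List.flatMap, List.flatMap]
  apply congrArg
  apply List.map_congr_left
  intro i hi
  rw [PySem.List.mem_pyRange_one] at hi
  rw [pv_claves_get malla i hi.1 hi.2, pv_inner_eq malla i hi.1 hi.2]

-- ===== VERDICT (by name: the statement is the Claim_ definition above) =====
theorem busca_duplicados_spec : Claim_equal_busca_duplicados := by
  intro malla _ hpre
  unfold Spec_busca_duplicados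
  exact pv_main malla hpre
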